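-- pv_equiv track=rewrite | github.com/TomHooperr/aoc-2023 | day4/day4.py | calc_card_score
-- ===== SOURCE A (Python) =====
-- def calc_card_score(winning_nums_have: list):
--     score = 0
--     for num in winning_nums_have:
--         if score == 0:
--             # 1 point for first win
--             score = 1
--         else:
--             # double points for each subsequent win
--             score *= 2
--     return score
-- ===== SOURCE B (Python) =====
-- def calc_card_score(winning_nums_have: list):
--     n = len(winning_nums_have)
--     return 0 if n == 0 else 2 ** (n - 1)
-- ===== Notes on version B (the rewrite author's own statement) =====
-- stated objective: simpler
-- what changed: Replaced the doubling loop with a closed-form expression: 0 for the empty list, else 2 ** (len(winning_nums_have) - 1).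
import Mathlib
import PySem

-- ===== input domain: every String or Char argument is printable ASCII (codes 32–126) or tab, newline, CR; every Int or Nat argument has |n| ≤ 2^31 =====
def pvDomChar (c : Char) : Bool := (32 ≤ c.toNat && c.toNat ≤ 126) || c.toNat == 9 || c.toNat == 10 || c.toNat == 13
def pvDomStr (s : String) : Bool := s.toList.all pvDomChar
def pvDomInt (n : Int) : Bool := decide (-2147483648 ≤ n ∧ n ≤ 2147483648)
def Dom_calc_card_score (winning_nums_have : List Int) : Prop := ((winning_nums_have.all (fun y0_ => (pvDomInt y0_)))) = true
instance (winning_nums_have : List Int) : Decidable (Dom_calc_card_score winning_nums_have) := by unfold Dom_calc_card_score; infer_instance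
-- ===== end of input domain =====

-- ===== PORT A =====
-- A: loop doubling a score (first win = 1, each later win doubles)
def calc_card_score (winning_nums_have : List Int) : Int :=
  winning_nums_have.foldl (fun score _num => if score = 0 then 1 else score * 2) 0

-- ===== PORT B =====
-- B: closed form — 0 for the empty list, else 2^(len-1)
def calc_card_score_alt (winning_nums_have : List Int) : Int :=
  if winning_nums_have.length = 0 then 0 else 2 ^ (winning_nums_have.length - 1)

-- ===== PRECONDITION & SPEC =====
def Spec_calc_card_score (winning_nums_have : List Int) (out : Int) : Prop := out = calc_card_score_alt winning_nums_have
instance (winning_nums_have : List Int) (out : Int) : Decidable (Spec_calc_card_score winning_nums_have out) := by unfold Spec_calc_card_score; infer_instance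

-- ===== CLAIM (what is proved, stated in full; the proofs are below) =====
def Claim_equal_calc_card_score : Prop := ∀ (winning_nums_have : List Int), Dom_calc_card_score winning_nums_have → Spec_calc_card_score winning_nums_have (calc_card_score winning_nums_have)

-- ===== LEMMAS AND PROOFS =====

-- ===== VERDICT (by name: the statement is the Claim_ definition above) =====
-- loop invariant: from a positive score the fold just doubles per element
lemma foldl_double (l : List Int) (s : Int) (hs : 0 < s) :
    l.foldl (fun score _num => if score = 0 then 1 else score * 2) s = s * 2 ^ l.length := by
  induction l generalizing s with
  | nil => simp
  | cons a t ih =>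
    have hns : s ≠ 0 := ne_of_gt hs
    simp only [List.foldl_cons, if_neg hns, List.length_cons]
    rw [ih (s * 2) (by positivity)]
    ring

theorem calc_card_score_spec : Claim_equal_calc_card_score := by
  intro l _
  unfold Spec_calc_card_score calc_card_score calc_card_score_alt
  cases l with
  | nil => simp
  | cons a t =>
    simp only [List.foldl_cons, if_true, List.length_cons, Nat.add_sub_cancel]
    rw [foldl_double t 1 one_pos]
    simp
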